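-- pv_equiv track=rewrite | github.com/bruhismyname/Praktikum-ASA-D2 | Pertemuan 3/persiapan.py | hitung_kombinasi
-- ===== SOURCE A (Python) =====
-- def hitung_kombinasi(nums1, nums2):
--     n = len(nums1)
--     posisi1 = {}
--     posisi2 = {}
--     for i in range(n):
--         posisi1[nums1[i]] = i
--         posisi2[nums2[i]] = i
--
--     hasil = 0
--
--     for i in range(n):
--         for j in range(i+1, n):
--             for k in range(j+1, n):
--                 nilai_i = nums1[i]
--                 nilai_j = nums1[j]
--                 nilai_k = nums1[k]
--
--                 if posisi2[nilai_i] < posisi2[nilai_j] < posisi2[nilai_k]: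
--                     hasil += 1
--
--     return hasil
-- ===== SOURCE B (Python) =====
-- def hitung_kombinasi(nums1, nums2):
--     n = len(nums1)
--     if n < 3:
--         return 0
--     pos2 = {}
--     for i in range(n):
--         pos2[nums2[i]] = i
--     p = [pos2[x] for x in nums1]
--     total = 0
--     for j in range(n):
--         pj = p[j]
--         kiri = sum(1 for x in p[:j] if x < pj)
--         kanan = sum(1 for x in p[j+1:] if x > pj)
--         total += kiri * kanan
--     return total
-- ===== Notes on version B (the rewrite author's own statement) =====
-- stated objective: faster
-- what changed: Replaces A's O(n^3) enumeration of all index triples with a per-middle-element count: map nums1 once through the nums2-position dict to a sequence p, then for each middle index j multiply the number of smaller positions before j by the number of larger positions after j and sum the products (O(n^2), with an n<3 early return). …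
-- outside the precondition, e.g. on hitung_kombinasi([1, 1, 0], [1, 1, 2, 0]): A returns 0, B raises KeyError
import Mathlib
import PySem

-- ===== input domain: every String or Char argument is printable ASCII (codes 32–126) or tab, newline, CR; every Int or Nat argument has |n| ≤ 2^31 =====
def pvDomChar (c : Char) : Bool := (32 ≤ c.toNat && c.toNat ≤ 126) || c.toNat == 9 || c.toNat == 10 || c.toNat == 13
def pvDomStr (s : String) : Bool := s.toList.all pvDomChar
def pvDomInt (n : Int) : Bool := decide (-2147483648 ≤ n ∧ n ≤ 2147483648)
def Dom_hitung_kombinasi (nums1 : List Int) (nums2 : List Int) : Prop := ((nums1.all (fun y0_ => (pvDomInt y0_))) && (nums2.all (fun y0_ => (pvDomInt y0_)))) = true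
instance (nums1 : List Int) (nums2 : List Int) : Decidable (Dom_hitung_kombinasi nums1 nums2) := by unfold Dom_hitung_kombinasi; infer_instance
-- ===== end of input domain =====

-- B replaces A's O(n^3) triple enumeration with an O(n^2) per-middle-element count
-- (smaller-before × larger-after, summed over middle indices); proved equal on Pre_.

-- ===== PORT A =====
def hitung_kombinasi (nums1 : List Int) (nums2 : List Int) : Int :=
  let n : Int := nums1.length
  -- one Python loop filling both dicts: the loop state is the pair (posisi1, posisi2); posisi1 is never read
  let pos := (PySem.List.pyRange 0 n 1).foldl
    (fun (pr : PySem.Dict Int Int × PySem.Dict Int Int) i =>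
      (pr.1.insert (PySem.List.pyGetD nums1 i 0) i, pr.2.insert (PySem.List.pyGetD nums2 i 0) i))
    (PySem.Dict.empty, PySem.Dict.empty)
  let posisi2 := pos.2
  (PySem.List.pyRange 0 n 1).foldl (fun hasil i =>
    (PySem.List.pyRange (i+1) n 1).foldl (fun hasil j =>
      (PySem.List.pyRange (j+1) n 1).foldl (fun hasil k =>
        let nilai_i := PySem.List.pyGetD nums1 i 0
        let nilai_j := PySem.List.pyGetD nums1 j 0
        let nilai_k := PySem.List.pyGetD nums1 k 0
        if posisi2.getD nilai_i 0 < posisi2.getD nilai_j 0 ∧ posisi2.getD nilai_j 0 < posisi2.getD nilai_k 0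
        then hasil + 1 else hasil) hasil) hasil) 0

-- ===== PORT B =====
def hitung_kombinasi_alt (nums1 : List Int) (nums2 : List Int) : Int :=
  let n : Int := nums1.length
  if n < 3 then 0 else
    let pos2 := (PySem.List.pyRange 0 n 1).foldl
      (fun (d : PySem.Dict Int Int) i => d.insert (PySem.List.pyGetD nums2 i 0) i) PySem.Dict.empty
    let p := nums1.map (fun x => pos2.getD x 0)
    (PySem.List.pyRange 0 n 1).foldl (fun total j =>
      let pj := PySem.List.pyGetD p j 0
      let kiri := ((PySem.List.slice p none (some j)).map (fun x => if x < pj then (1:Int) else 0)).sum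
      let kanan := ((PySem.List.slice p (some (j+1)) none).map (fun x => if pj < x then (1:Int) else 0)).sum
      total + kiri * kanan) 0

-- ===== PRECONDITION & SPEC =====
-- Pre_ excludes inputs where len(nums2) < len(nums1) (A raises IndexError) and, for n ≥ 3, inputs with a
-- nums1 value missing from nums2[:n]: there A raises KeyError, except that A's chained comparison can
-- short-circuit past the missing key and return 0, where B's full position-mapping naturally raises KeyError.
def Pre_hitung_kombinasi (nums1 : List Int) (nums2 : List Int) : Prop :=
  nums1.length ≤ nums2.length ∧ (nums1.length < 3 ∨ ∀ x ∈ nums1, x ∈ nums2.take nums1.length)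
instance (nums1 : List Int) (nums2 : List Int) : Decidable (Pre_hitung_kombinasi nums1 nums2) := by
  unfold Pre_hitung_kombinasi; infer_instance
def pvWitness_hitung_kombinasi : List Int × List Int := ([0, 2, 1], [1, 0, 2])
def Spec_hitung_kombinasi (nums1 : List Int) (nums2 : List Int) (out : Int) : Prop := out = hitung_kombinasi_alt nums1 nums2
instance (nums1 : List Int) (nums2 : List Int) (out : Int) : Decidable (Spec_hitung_kombinasi nums1 nums2 out) := by unfold Spec_hitung_kombinasi; infer_instance

-- ===== CLAIM (what is proved, stated in full; the proofs are below) =====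
def Claim_equal_hitung_kombinasi : Prop := ∀ (nums1 : List Int) (nums2 : List Int), Dom_hitung_kombinasi nums1 nums2 → Pre_hitung_kombinasi nums1 nums2 → Spec_hitung_kombinasi nums1 nums2 (hitung_kombinasi nums1 nums2)

-- ===== LEMMAS AND PROOFS =====

-- A's triple loop counts index triples i < j < k of an abstract position sequence q with q i < q j < q k …
def tripCount (q : Nat → Int) (n : Nat) : Int :=
  ∑ i ∈ Finset.Ico 0 n, ∑ j ∈ Finset.Ico (i+1) n, ∑ k ∈ Finset.Ico (j+1) n,
    if q i < q j ∧ q j < q k then (1:Int) else 0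

-- … and B sums, over each middle index j, (#smaller before j) * (#larger after j).
def midCount (q : Nat → Int) (n : Nat) : Int :=
  ∑ j ∈ Finset.Ico 0 n,
    (∑ i ∈ Finset.Ico 0 j, if q i < q j then (1:Int) else 0) *
    (∑ k ∈ Finset.Ico (j+1) n, if q j < q k then (1:Int) else 0)

theorem list_sum_range (f : Nat → Int) (m : Nat) :
    ((List.range m).map f).sum = ∑ i ∈ Finset.range m, f i := by
  induction m with
  | zero => simp
  | succ m ih => rw [List.range_succ, Finset.sum_range_succ, List.map_append]; simp [ih]

theorem sum_pyRange (f : Int → Int) (a b : Nat) :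
    ((PySem.List.pyRange (a:Int) (b:Int) 1).map f).sum = ∑ t ∈ Finset.Ico a b, f (t:Int) := by
  rw [PySem.List.pyRange_one, List.map_map,
    show ((b:Int)-(a:Int)).toNat = b - a by omega, list_sum_range, Finset.sum_Ico_eq_sum_range]
  apply Finset.sum_congr rfl
  intro u _
  show f ((a:Int) + (u:Int)) = f ((a + u : Nat) : Int)
  norm_cast

theorem foldl_count (P : Int → Prop) [DecidablePred P] (l : List Int) (h0 : Int) :
    l.foldl (fun h k => if P k then h + 1 else h) h0
      = h0 + (l.map (fun k => if P k then (1:Int) else 0)).sum := by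
  rw [show (fun (h k : Int) => if P k then h + 1 else h)
      = (fun h k => h + (if P k then (1:Int) else 0)) from by
    funext h k; split <;> simp]
  exact PySem.List.foldl_add l _ h0

theorem sum_swap_lt (F : Nat → Nat → Int) (n : Nat) :
    ∑ i ∈ Finset.Ico 0 n, ∑ j ∈ Finset.Ico (i+1) n, F i j
      = ∑ j ∈ Finset.Ico 0 n, ∑ i ∈ Finset.Ico 0 j, F i j := by
  have h1 : ∀ i : Nat, Finset.Ico (i+1) n = (Finset.range n).filter (fun j => i < j) := by
    intro i; ext j; simp; omega
  have h2 : ∀ j : Nat, j ≤ n → Finset.Ico 0 j = (Finset.range n).filter (fun i => i < j) := by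
    intro j hj; ext i; simp; omega
  rw [show Finset.Ico 0 n = Finset.range n by rw [Finset.range_eq_Ico]]
  calc ∑ i ∈ Finset.range n, ∑ j ∈ Finset.Ico (i+1) n, F i j
      = ∑ i ∈ Finset.range n, ∑ j ∈ Finset.range n, if i < j then F i j else 0 := by
        apply Finset.sum_congr rfl; intro i _; rw [h1 i, Finset.sum_filter]
    _ = ∑ j ∈ Finset.range n, ∑ i ∈ Finset.range n, if i < j then F i j else 0 := Finset.sum_comm
    _ = ∑ j ∈ Finset.range n, ∑ i ∈ Finset.Ico 0 j, F i j := by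
        apply Finset.sum_congr rfl; intro j hj
        rw [h2 j (by simp at hj; omega), Finset.sum_filter]

theorem tripCount_eq_midCount (q : Nat → Int) (n : Nat) : tripCount q n = midCount q n := by
  unfold tripCount midCount
  rw [sum_swap_lt (fun i j => ∑ k ∈ Finset.Ico (j+1) n, if q i < q j ∧ q j < q k then (1:Int) else 0) n]
  apply Finset.sum_congr rfl
  intro j _
  rw [Finset.sum_mul_sum]
  apply Finset.sum_congr rfl; intro i _
  apply Finset.sum_congr rfl; intro k _
  by_cases h1 : q i < q j <;> by_cases h2 : q j < q k <;> simp [h1, h2]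

theorem tripCount_eq_zero (q : Nat → Int) (n : Nat) (h : n < 3) : tripCount q n = 0 := by
  unfold tripCount
  apply Finset.sum_eq_zero; intro i hi
  apply Finset.sum_eq_zero; intro j hj
  simp only [Finset.mem_Ico] at hi hj
  rw [Finset.Ico_eq_empty (by omega), Finset.sum_empty]

theorem take_eq_map_range (xs : List Int) (t : Nat) (ht : t ≤ xs.length) :
    xs.take t = (List.range t).map (fun i => xs.getD i 0) := by
  apply List.ext_getElem
  · simp; omega
  · intro i h1 h2
    simp at h1 ⊢
    rw [List.getElem?_eq_getElem (by omega : i < xs.length)]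
    rfl

theorem drop_eq_map_range (xs : List Int) (a : Nat) :
    xs.drop a = (List.range (xs.length - a)).map (fun u => xs.getD (a+u) 0) := by
  apply List.ext_getElem
  · simp
  · intro i h1 h2
    simp at h1 ⊢
    rw [List.getElem?_eq_getElem (by omega : a + i < xs.length)]
    rfl

theorem portA_eq (f : Int → Int) (n : Nat) :
    (PySem.List.pyRange 0 (n:Int) 1).foldl (fun hasil i =>
      (PySem.List.pyRange (i+1) (n:Int) 1).foldl (fun hasil j =>
        (PySem.List.pyRange (j+1) (n:Int) 1).foldl (fun hasil k =>
          if f i < f j ∧ f j < f k then hasil + 1 else hasil) hasil) hasil) 0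
    = tripCount (fun t => f (t:Int)) n := by
  simp only [foldl_count, PySem.List.foldl_add, zero_add]
  have h0 := sum_pyRange (fun i =>
    ((PySem.List.pyRange (i+1) (n:Int) 1).map (fun j =>
      ((PySem.List.pyRange (j+1) (n:Int) 1).map (fun k =>
        if f i < f j ∧ f j < f k then (1:Int) else 0)).sum)).sum) 0 n
  simp only [Nat.cast_zero] at h0
  rw [h0]
  unfold tripCount
  apply Finset.sum_congr rfl
  intro t _
  rw [show ((t:Int)+1) = (((t+1:Nat)):Int) by push_cast; ring, sum_pyRange]
  apply Finset.sum_congr rfl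
  intro u _
  rw [show ((u:Int)+1) = (((u+1:Nat)):Int) by push_cast; ring, sum_pyRange]

theorem main_eq (nums1 nums2 : List Int) :
    hitung_kombinasi nums1 nums2 = hitung_kombinasi_alt nums1 nums2 := by
  simp only [hitung_kombinasi, hitung_kombinasi_alt]
  set n := nums1.length with hn
  rw [PySem.List.foldl_prod_mk
      (fun (d : PySem.Dict Int Int) i => d.insert (PySem.List.pyGetD nums1 i 0) i)
      (fun (d : PySem.Dict Int Int) i => d.insert (PySem.List.pyGetD nums2 i 0) i)
      (PySem.List.pyRange 0 (n:Int) 1) PySem.Dict.empty PySem.Dict.empty]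
  set D := List.foldl (fun (d : PySem.Dict Int Int) i => d.insert (PySem.List.pyGetD nums2 i 0) i)
      PySem.Dict.empty (PySem.List.pyRange 0 (n:Int) 1) with hD
  set g : Int → Int := fun x => D.getD x 0 with hg
  set q : Nat → Int := fun t => g (nums1.getD t 0) with hq
  set p := nums1.map g with hp
  rw [portA_eq (fun i => D.getD (PySem.List.pyGetD nums1 i 0) 0) n]
  have hqe : (fun t : Nat => D.getD (PySem.List.pyGetD nums1 (t:Int) 0) 0) = q := by
    funext t; simp [hq, hg]
  rw [hqe]
  by_cases hlt : (n:Int) < 3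
  · rw [if_pos hlt, tripCount_eq_zero q n (by exact_mod_cast hlt)]
  · rw [if_neg hlt, tripCount_eq_midCount]
    have h0 := sum_pyRange (fun j =>
      ((PySem.List.slice p none (some j)).map (fun x => if x < PySem.List.pyGetD p j 0 then (1:Int) else 0)).sum *
      ((PySem.List.slice p (some (j+1)) none).map (fun x => if PySem.List.pyGetD p j 0 < x then (1:Int) else 0)).sum) 0 n
    simp only [Nat.cast_zero] at h0
    rw [PySem.List.foldl_add, zero_add, h0]
    unfold midCount
    apply Finset.sum_congr rfl
    intro t ht
    have htn : t < n := by simp at ht; omega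
    have hpl : p.length = n := by simp [hp, hn]
    have hpj : PySem.List.pyGetD p (t:Int) 0 = q t := by
      rw [PySem.List.pyGetD_natCast, hp]
      rw [List.getD_eq_getElem _ 0 (by simpa using htn), List.getElem_map]
      simp only [hq, hg]
      rw [List.getD_eq_getElem nums1 0 (by omega)]
    rw [hpj, PySem.List.slice_to_natCast,
      show ((t:Int)+1) = (((t+1:Nat)):Int) by push_cast; ring, PySem.List.slice_from_natCast]
    rw [hp, ← List.map_take, ← List.map_drop, List.map_map, List.map_map,
      take_eq_map_range nums1 t (by omega), drop_eq_map_range nums1 (t+1),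
      List.map_map, List.map_map, list_sum_range, list_sum_range,
      Finset.sum_Ico_eq_sum_range (fun k => if q t < q k then (1:Int) else 0) (t+1) n,
      Finset.range_eq_Ico]
    simp only [Function.comp_def, hq, hg, ← hn]

-- ===== VERDICT (by name: the statement is the Claim_ definition above) =====
theorem hitung_kombinasi_spec : Claim_equal_hitung_kombinasi := by
  intro nums1 nums2 _ _
  unfold Spec_hitung_kombinasi
  exact main_eq nums1 nums2
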